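-- pv_equiv track=rewrite | github.com/Thompson-Junyang/April-Tag-Cam-SIDS-Project | generate_tag/generate.py | layout_grid_per_page
-- ===== SOURCE A (Python) =====
-- ANNOTATE_ID = True                       # 标签下方是否打印“ID=xxx”
--
-- def layout_grid_per_page(tag_px: int, margin_px: int, gap_px: int, page_w_px: int, page_h_px: int, annotate_h_px: int):
--     """计算一页能排多少列/行，以及每页的起始坐标网格。"""
--     # 每个单元高度需要考虑标签图像高度 + 注记高度（若开启）
--     cell_w = tag_px
--     cell_h = tag_px + (annotate_h_px if ANNOTATE_ID else 0)
--
--     usable_w = page_w_px - 2 * margin_px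
--     usable_h = page_h_px - 2 * margin_px
--
--     # 至少放 1 列/行
--     cols = max(1, (usable_w + gap_px) // (cell_w + gap_px))
--     rows = max(1, (usable_h + gap_px) // (cell_h + gap_px))
--
--     # 实际占用尺寸
--     total_w = cols * cell_w + (cols - 1) * gap_px
--     total_h = rows * cell_h + (rows - 1) * gap_px
--
--     # 左上角起点（居中）
--     start_x = margin_px + (usable_w - total_w) // 2
--     start_y = margin_px + (usable_h - total_h) // 2
--
--     # 生成网格左上角坐标
--     slots = []
--     y = start_y
--     for _ in range(rows):
--         x = start_x
--         for _ in range(cols):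
--             slots.append((x, y))
--             x += cell_w + gap_px
--         y += cell_h + gap_px
--
--     return cols, rows, slots
-- ===== SOURCE B (Python) =====
-- ANNOTATE_ID = True
--
-- def _tile(block, n, dx, dy):
--     """n translated copies of block (copy i shifted by (i*dx, i*dy)), built by doubling."""
--     if n <= 0:
--         return []
--     if n == 1:
--         return list(block)
--     h = n // 2
--     half = _tile(block, h, dx, dy)
--     out = half + [(x + h * dx, y + h * dy) for (x, y) in half]
--     if n % 2:
--         out += [(x + (n - 1) * dx, y + (n - 1) * dy) for (x, y) in block]
--     return out
--
-- def layout_grid_per_page(tag_px: int, margin_px: int, gap_px: int, page_w_px: int, page_h_px: int, annotate_h_px: int):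
--     cell_w = tag_px
--     cell_h = tag_px + (annotate_h_px if ANNOTATE_ID else 0)
--     usable_w = page_w_px - 2 * margin_px
--     usable_h = page_h_px - 2 * margin_px
--     cols = max(1, (usable_w + gap_px) // (cell_w + gap_px))
--     rows = max(1, (usable_h + gap_px) // (cell_h + gap_px))
--     total_w = cols * cell_w + (cols - 1) * gap_px
--     total_h = rows * cell_h + (rows - 1) * gap_px
--     start_x = margin_px + (usable_w - total_w) // 2
--     start_y = margin_px + (usable_h - total_h) // 2
--     row = _tile([(start_x, start_y)], cols, cell_w + gap_px, 0)
--     slots = _tile(row, rows, 0, cell_h + gap_px)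
--     return cols, rows, slots
-- ===== Notes on version B (the rewrite author's own statement) =====
-- stated objective: alternative
-- what changed: A's accumulator-carrying double loop is replaced by a divide-and-conquer tile-replication helper: a single seed slot is replicated cols times horizontally by repeated doubling (shift-and-concatenate), then that row is replicated rows times vertically the same way.
-- outside the precondition, e.g. on layout_grid_per_page(0, 0, 0, 10, 10, 0): A raises ZeroDivisionError, B raises ZeroDivisionError
import Mathlib
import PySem

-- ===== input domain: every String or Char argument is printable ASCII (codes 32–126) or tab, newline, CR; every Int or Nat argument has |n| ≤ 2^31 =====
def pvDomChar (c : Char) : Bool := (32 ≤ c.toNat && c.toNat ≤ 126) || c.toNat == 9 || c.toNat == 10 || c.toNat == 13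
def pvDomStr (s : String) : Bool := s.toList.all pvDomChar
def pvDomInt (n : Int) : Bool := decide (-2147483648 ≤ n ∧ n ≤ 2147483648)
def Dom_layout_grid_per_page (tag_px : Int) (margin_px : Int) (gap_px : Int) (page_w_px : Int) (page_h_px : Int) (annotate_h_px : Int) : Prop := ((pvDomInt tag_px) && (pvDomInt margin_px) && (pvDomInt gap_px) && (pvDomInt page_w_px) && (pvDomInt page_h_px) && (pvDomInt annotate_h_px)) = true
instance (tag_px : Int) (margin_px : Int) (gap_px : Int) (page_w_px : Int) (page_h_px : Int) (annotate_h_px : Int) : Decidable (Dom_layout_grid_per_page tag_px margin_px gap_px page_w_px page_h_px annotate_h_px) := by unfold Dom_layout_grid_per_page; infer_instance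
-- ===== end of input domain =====

-- B replaces A's accumulator double loop by divide-and-conquer tile replication
-- (doubling a seed slot into a row, then the row into the grid); objective: alternative.

-- ===== PORT A =====
def layout_grid_per_page (tag_px : Int) (margin_px : Int) (gap_px : Int) (page_w_px : Int) (page_h_px : Int) (annotate_h_px : Int) : Int × Int × (List (Int × Int)) :=
  let cell_w := tag_px
  let cell_h := tag_px + annotate_h_px      -- ANNOTATE_ID = True
  let usable_w := page_w_px - 2 * margin_px
  let usable_h := page_h_px - 2 * margin_px
  let cols := max 1 (PySem.Int.floordiv (usable_w + gap_px) (cell_w + gap_px))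
  let rows := max 1 (PySem.Int.floordiv (usable_h + gap_px) (cell_h + gap_px))
  let total_w := cols * cell_w + (cols - 1) * gap_px
  let total_h := rows * cell_h + (rows - 1) * gap_px
  let start_x := margin_px + PySem.Int.floordiv (usable_w - total_w) 2
  let start_y := margin_px + PySem.Int.floordiv (usable_h - total_h) 2
  -- slots = []; y = start_y; for _ in range(rows): x = start_x; for _ in range(cols): append; x += …; y += …
  let st :=
    (List.range rows.toNat).foldl
      (fun (st : List (Int × Int) × Int) _ =>
        let inner :=
          (List.range cols.toNat).foldl
            (fun (st2 : List (Int × Int) × Int) _ =>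
              (st2.1 ++ [(st2.2, st.2)], st2.2 + (cell_w + gap_px)))
            (st.1, start_x)
        (inner.1, st.2 + (cell_h + gap_px)))
      ([], start_y)
  (cols, rows, st.1)

-- ===== PORT B =====
-- n translated copies of block (copy i shifted by (i*dx, i*dy)), built by doubling (Source B's _tile).
def pvTile (block : List (Int × Int)) (n : Nat) (dx dy : Int) : List (Int × Int) :=
  if n = 0 then []
  else if n = 1 then block
  else
    let h := n / 2
    let half := pvTile block h dx dy
    let out := half ++ half.map (fun p => (p.1 + (h : Int) * dx, p.2 + (h : Int) * dy))
    if n % 2 = 1 then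
      out ++ block.map (fun p => (p.1 + ((n : Int) - 1) * dx, p.2 + ((n : Int) - 1) * dy))
    else out
termination_by n
decreasing_by omega

def layout_grid_per_page_alt (tag_px : Int) (margin_px : Int) (gap_px : Int) (page_w_px : Int) (page_h_px : Int) (annotate_h_px : Int) : Int × Int × (List (Int × Int)) :=
  let cell_w := tag_px
  let cell_h := tag_px + annotate_h_px
  let usable_w := page_w_px - 2 * margin_px
  let usable_h := page_h_px - 2 * margin_px
  let cols := max 1 (PySem.Int.floordiv (usable_w + gap_px) (cell_w + gap_px))
  let rows := max 1 (PySem.Int.floordiv (usable_h + gap_px) (cell_h + gap_px))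
  let total_w := cols * cell_w + (cols - 1) * gap_px
  let total_h := rows * cell_h + (rows - 1) * gap_px
  let start_x := margin_px + PySem.Int.floordiv (usable_w - total_w) 2
  let start_y := margin_px + PySem.Int.floordiv (usable_h - total_h) 2
  let row := pvTile [(start_x, start_y)] cols.toNat (cell_w + gap_px) 0
  let slots := pvTile row rows.toNat 0 (cell_h + gap_px)
  (cols, rows, slots)

-- ===== PRECONDITION & SPEC =====
-- Pre_ excludes exactly the inputs where Python A raises ZeroDivisionError
-- (cell width + gap = 0 or cell height + gap = 0); B raises there too.
def Pre_layout_grid_per_page (tag_px : Int) (margin_px : Int) (gap_px : Int) (page_w_px : Int) (page_h_px : Int) (annotate_h_px : Int) : Prop :=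
  tag_px + gap_px ≠ 0 ∧ tag_px + annotate_h_px + gap_px ≠ 0
instance (tag_px : Int) (margin_px : Int) (gap_px : Int) (page_w_px : Int) (page_h_px : Int) (annotate_h_px : Int) : Decidable (Pre_layout_grid_per_page tag_px margin_px gap_px page_w_px page_h_px annotate_h_px) := by unfold Pre_layout_grid_per_page; infer_instance

def pvWitness_layout_grid_per_page : Int × Int × Int × Int × Int × Int := (100, 20, 10, 800, 1100, 30)

def Spec_layout_grid_per_page (tag_px : Int) (margin_px : Int) (gap_px : Int) (page_w_px : Int) (page_h_px : Int) (annotate_h_px : Int) (out : Int × Int × (List (Int × Int))) : Prop := out = layout_grid_per_page_alt tag_px margin_px gap_px page_w_px page_h_px annotate_h_px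
instance (tag_px : Int) (margin_px : Int) (gap_px : Int) (page_w_px : Int) (page_h_px : Int) (annotate_h_px : Int) (out : Int × Int × (List (Int × Int))) : Decidable (Spec_layout_grid_per_page tag_px margin_px gap_px page_w_px page_h_px annotate_h_px out) := by unfold Spec_layout_grid_per_page; infer_instance

-- ===== CLAIM (what is proved, stated in full; the proofs are below) =====
def Claim_equal_layout_grid_per_page : Prop := ∀ (tag_px : Int) (margin_px : Int) (gap_px : Int) (page_w_px : Int) (page_h_px : Int) (annotate_h_px : Int), Dom_layout_grid_per_page tag_px margin_px gap_px page_w_px page_h_px annotate_h_px → Pre_layout_grid_per_page tag_px margin_px gap_px page_w_px page_h_px annotate_h_px → Spec_layout_grid_per_page tag_px margin_px gap_px page_w_px page_h_px annotate_h_px (layout_grid_per_page tag_px margin_px gap_px page_w_px page_h_px annotate_h_px)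

-- ===== LEMMAS AND PROOFS =====

-- Splitting a flatMap over range (a+b).
theorem flatMap_range_add {α : Type} (f : Nat → List α) (a b : Nat) :
    (List.range (a + b)).flatMap f
      = (List.range a).flatMap f ++ (List.range b).flatMap (fun i => f (a + i)) := by
  rw [List.range_add, List.flatMap_append, List.flatMap_map]

-- pvTile equals the flatMap-of-shifted-copies closed form.
theorem pvTile_eq (n : Nat) (block : List (Int × Int)) (dx dy : Int) :
    pvTile block n dx dy
      = (List.range n).flatMap (fun (i : Nat) => block.map (fun p => (p.1 + (i : Int) * dx, p.2 + (i : Int) * dy))) := by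
  induction n using Nat.strong_induction_on with
  | _ n ih =>
    rw [pvTile]
    by_cases h0 : n = 0
    · simp [h0]
    by_cases h1 : n = 1
    · simp [h1]
    have hlt : n / 2 < n := by omega
    simp only [h0, h1, if_false]
    rw [ih (n / 2) hlt]
    have key : ∀ (s : Int), ((List.range (n / 2)).flatMap
        (fun (i : Nat) => block.map (fun p => (p.1 + (i : Int) * dx, p.2 + (i : Int) * dy)))).map
        (fun p => (p.1 + s * dx, p.2 + s * dy))
        = (List.range (n / 2)).flatMap
            (fun (i : Nat) => block.map (fun p => (p.1 + ((i : Int) + s) * dx, p.2 + ((i : Int) + s) * dy))) := by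
      intro s
      rw [List.map_flatMap]
      refine List.flatMap_congr ?_
      intro i _
      rw [List.map_map]
      refine List.map_congr_left ?_
      intro p _
      simp only [Function.comp, Prod.mk.injEq]
      constructor <;> ring
    by_cases hpar : n % 2 = 1
    · rw [if_pos hpar]
      have h2 : n = n / 2 + (n / 2 + 1) := by omega
      conv_rhs => rw [h2]
      rw [flatMap_range_add
        (fun (i : Nat) => block.map (fun p => (p.1 + (i : Int) * dx, p.2 + (i : Int) * dy)))
        (n / 2) (n / 2 + 1)]
      rw [List.append_assoc]
      congr 1
      rw [List.range_succ, List.flatMap_append, List.flatMap_cons, List.flatMap_nil,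
        List.append_nil]
      congr 1
      · rw [key]
        refine List.flatMap_congr ?_
        intro i _
        refine List.map_congr_left ?_
        intro p _
        simp only [Prod.mk.injEq]
        push_cast
        constructor <;> ring
      · refine List.map_congr_left ?_
        intro p _
        simp only [Prod.mk.injEq]
        have hn : ((n : Int) - 1) = ((n / 2 : Nat) : Int) + ((n / 2 : Nat) : Int) := by
          push_cast; omega
        rw [hn]
        push_cast
        constructor <;> ring
    · rw [if_neg hpar]
      have h2 : n = n / 2 + n / 2 := by omega
      conv_rhs => rw [h2]
      rw [flatMap_range_add
        (fun (i : Nat) => block.map (fun p => (p.1 + (i : Int) * dx, p.2 + (i : Int) * dy)))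
        (n / 2) (n / 2)]
      congr 1
      rw [key]
      refine List.flatMap_congr ?_
      intro i _
      refine List.map_congr_left ?_
      intro p _
      simp only [Prod.mk.injEq]
      push_cast
      constructor <;> ring

-- A's inner row loop equals the closed-form map over column indices.
theorem inner_loop_eq (n : Nat) (acc : List (Int × Int)) (x y s : Int) :
    (List.range n).foldl
      (fun (st2 : List (Int × Int) × Int) _ => (st2.1 ++ [(st2.2, y)], st2.2 + s)) (acc, x)
    = (acc ++ (List.range n).map (fun (c : Nat) => (x + (c : Int) * s, y)), x + (n : Int) * s) := by
  induction n generalizing acc x with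
  | zero => simp
  | succ k ih =>
    rw [List.range_succ, List.foldl_append, ih]
    simp only [List.foldl_cons, List.foldl_nil, List.map_append, List.map_cons, List.map_nil,
      List.append_assoc, Prod.mk.injEq]
    refine ⟨trivial, by push_cast; ring⟩

-- A's outer loop equals the closed-form flatMap over row indices.
theorem outer_loop_eq (m : Nat) (cn : Nat) (acc : List (Int × Int)) (x0 y0 sx sy : Int) :
    (List.range m).foldl
      (fun (st : List (Int × Int) × Int) _ =>
        let inner :=
          (List.range cn).foldl
            (fun (st2 : List (Int × Int) × Int) _ => (st2.1 ++ [(st2.2, st.2)], st2.2 + sx))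
            (st.1, x0)
        (inner.1, st.2 + sy))
      (acc, y0)
    = (acc ++ (List.range m).flatMap (fun (r : Nat) =>
         (List.range cn).map (fun (c : Nat) => (x0 + (c : Int) * sx, y0 + (r : Int) * sy))),
       y0 + (m : Int) * sy) := by
  induction m generalizing acc y0 with
  | zero => simp
  | succ k ih =>
    rw [List.range_succ, List.foldl_append, ih]
    simp only [List.foldl_cons, List.foldl_nil, inner_loop_eq, List.flatMap_append,
      List.flatMap_cons, List.flatMap_nil, List.append_assoc, List.append_nil, Prod.mk.injEq]
    refine ⟨trivial, by push_cast; ring⟩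

-- B's two-stage tiling equals the same closed form.
theorem tile_tile_eq (cn rn : Nat) (x0 y0 sx sy : Int) :
    pvTile (pvTile [(x0, y0)] cn sx 0) rn 0 sy
      = (List.range rn).flatMap (fun (r : Nat) =>
          (List.range cn).map (fun (c : Nat) => (x0 + (c : Int) * sx, y0 + (r : Int) * sy))) := by
  rw [pvTile_eq, pvTile_eq]
  refine List.flatMap_congr ?_
  intro r _
  rw [List.map_flatMap]
  simp [← List.map_eq_flatMap]

-- ===== VERDICT (by name: the statement is the Claim_ definition above) =====
theorem layout_grid_per_page_spec : Claim_equal_layout_grid_per_page := by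
  intro tag_px margin_px gap_px page_w_px page_h_px annotate_h_px _ _
  unfold Spec_layout_grid_per_page layout_grid_per_page layout_grid_per_page_alt
  simp only [outer_loop_eq, tile_tile_eq, List.nil_append]
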